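-- pv_equiv track=rewrite | github.com/Kayman13/HW_Python_Automation | InfinityLoop.py | loop
-- ===== SOURCE A (Python) =====
-- def loop(a, b):
--     steps = 0
--
--     while a != b:
--         a += 1
--         b -= 1
--         steps += 1
--
--         if steps > 10:
--             return True
--
--     return False
-- ===== SOURCE B (Python) =====
-- def loop(a, b):
--     d = b - a
--     return not (0 <= d <= 20 and d % 2 == 0)
-- ===== Notes on version B (the rewrite author's own statement) =====
-- stated objective: simpler
-- what changed: Replaces the step-by-step increment/decrement loop with a closed-form arithmetic test on d = b - a (converges iff 0 <= d <= 20 and d is even).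
import Mathlib
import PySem

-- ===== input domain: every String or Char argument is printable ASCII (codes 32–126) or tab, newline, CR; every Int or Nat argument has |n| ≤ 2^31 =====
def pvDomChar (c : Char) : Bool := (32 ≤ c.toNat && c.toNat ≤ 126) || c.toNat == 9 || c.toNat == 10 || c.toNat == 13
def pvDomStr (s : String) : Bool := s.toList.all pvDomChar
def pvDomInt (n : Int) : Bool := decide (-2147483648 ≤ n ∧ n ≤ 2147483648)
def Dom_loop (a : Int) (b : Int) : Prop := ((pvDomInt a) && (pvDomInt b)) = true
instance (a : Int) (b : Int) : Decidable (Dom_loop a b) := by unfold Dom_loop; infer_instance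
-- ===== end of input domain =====

-- ===== PORT A =====
-- B replaces A's step loop with a closed-form arithmetic test on b - a; return value only.
-- fuel counts the remaining iterations before `steps > 10` fires (starts at 10;
-- at fuel 0 an unequal pair means the 11th iteration would return True).
def loopAux (a : Int) (b : Int) : Nat → Bool
  | 0 => if a = b then false else true
  | n + 1 => if a = b then false else loopAux (a + 1) (b - 1) n

def loop (a : Int) (b : Int) : Bool := loopAux a b 10

-- ===== PORT B =====
def loop_alt (a : Int) (b : Int) : Bool :=
  let d := b - a
  !(decide (0 ≤ d) && decide (d ≤ 20) && decide (d % 2 = 0))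

-- ===== PRECONDITION & SPEC =====
def Spec_loop (a : Int) (b : Int) (out : Bool) : Prop := out = loop_alt a b
instance (a : Int) (b : Int) (out : Bool) : Decidable (Spec_loop a b out) := by unfold Spec_loop; infer_instance

-- ===== CLAIM (what is proved, stated in full; the proofs are below) =====
def Claim_equal_loop : Prop := ∀ (a : Int) (b : Int), Dom_loop a b → Spec_loop a b (loop a b)

-- ===== LEMMAS AND PROOFS =====
theorem loopAux_eq (n : Nat) : ∀ (a b : Int),
    loopAux a b n = !(decide (0 ≤ b - a) && decide (b - a ≤ 2 * n) && decide ((b - a) % 2 = 0)) := by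
  induction n with
  | zero =>
    intro a b
    simp only [loopAux]
    by_cases h : a = b
    · simp [h]
    · have : ¬ (0 ≤ b - a ∧ b - a ≤ 2 * (0 : Nat) ∧ (b - a) % 2 = 0) := by
        intro ⟨h1, h2, h3⟩; omega
      simp only [Nat.cast_zero] at this ⊢
      simp [h]
      omega
  | succ n ih =>
    intro a b
    simp only [loopAux]
    by_cases h : a = b
    · simp [h]; omega
    · rw [if_neg h, ih]
      have harg : b - 1 - (a + 1) = b - a - 2 := by ring
      rw [harg]
      congr 1
      simp only [← Bool.decide_and, decide_eq_decide]
      push_cast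
      omega

-- ===== VERDICT (by name: the statement is the Claim_ definition above) =====
theorem loop_spec : Claim_equal_loop := by
  intro a b _
  unfold Spec_loop loop loop_alt
  rw [loopAux_eq]
  norm_num
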